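-- pv_equiv track=rewrite | github.com/joseslavkis/Teoria-de-Algoritmos | Programación dinámica/ej10.py | plan_operativo
-- ===== SOURCE A (Python) =====
-- def plan_operativo(arreglo_L, arreglo_C, costo_M):
--     n = len(arreglo_L)
--     optLondres = [0] * n
--     optCalifornia = [0] * n
--
--     optLondres[0] = arreglo_L[0]
--     optCalifornia[0] = arreglo_C[0]
--
--     for i in range(1, n):
--         optLondres[i] = arreglo_L[i] + min(optLondres[i - 1], costo_M + optCalifornia[i - 1])
--         optCalifornia[i] = arreglo_C[i] + min(optCalifornia[i - 1], costo_M + optLondres[i - 1])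
--
--     return reconstrucción(optCalifornia, optLondres, arreglo_L, arreglo_C)
--
-- def reconstrucción(optCalifornia, optLondres, arreglo_L, arreglo_C):
--     resultado = []
--     n = len(optLondres)
--
--     if optLondres[-1] < optCalifornia[-1]:
--         ciudad_actual = "londres"
--     else:
--         ciudad_actual = "california"
--
--     resultado.append(ciudad_actual)
--
--     for i in range(n - 1, 0, -1):
--         if ciudad_actual == "londres":
--             if optLondres[i] - arreglo_L[i] == optLondres[i - 1]:
--                 ciudad_actual = "londres"
--             else:
--                 ciudad_actual = "california"
--         else:
--             if optCalifornia[i] - arreglo_C[i] == optCalifornia[i - 1]: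
--                 ciudad_actual = "california"
--             else:
--                 ciudad_actual = "londres"
--         resultado.append(ciudad_actual)
--
--     return resultado[::-1]
-- ===== SOURCE B (Python) =====
-- def plan_operativo(arreglo_L, arreglo_C, costo_M):
--     # Single forward pass carrying the two candidate itineraries as shared
--     # cons-chains (newest city first) with their costs; no opt arrays and no
--     # backward reconstruction phase.
--     costL, cadenaL = arreglo_L[0], ("londres", None)
--     costC, cadenaC = arreglo_C[0], ("california", None)
--     for cl, cc in zip(arreglo_L[1:], arreglo_C[1:]):
--         nuevoL = cl + min(costL, costo_M + costC)
--         nuevaCadL = ("londres", cadenaL if costL <= costo_M + costC else cadenaC)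
--         nuevoC = cc + min(costC, costo_M + costL)
--         nuevaCadC = ("california", cadenaC if costC <= costo_M + costL else cadenaL)
--         costL, cadenaL, costC, cadenaC = nuevoL, nuevaCadL, nuevoC, nuevaCadC
--     cadena = cadenaL if costL < costC else cadenaC
--     plan = []
--     while cadena is not None:
--         plan.append(cadena[0])
--         cadena = cadena[1]
--     plan.reverse()
--     return plan
-- ===== Notes on version B (the rewrite author's own statement) =====
-- stated objective: alternative
-- what changed: B eliminates A's DP-arrays-plus-backward-reconstruction entirely: a single forward pass carries the two candidate itineraries as shared cons-chains together with their running costs and simply returns the cheaper finished plan reversed, so no opt arrays exist and no backtracking phase runs.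
import Mathlib
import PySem

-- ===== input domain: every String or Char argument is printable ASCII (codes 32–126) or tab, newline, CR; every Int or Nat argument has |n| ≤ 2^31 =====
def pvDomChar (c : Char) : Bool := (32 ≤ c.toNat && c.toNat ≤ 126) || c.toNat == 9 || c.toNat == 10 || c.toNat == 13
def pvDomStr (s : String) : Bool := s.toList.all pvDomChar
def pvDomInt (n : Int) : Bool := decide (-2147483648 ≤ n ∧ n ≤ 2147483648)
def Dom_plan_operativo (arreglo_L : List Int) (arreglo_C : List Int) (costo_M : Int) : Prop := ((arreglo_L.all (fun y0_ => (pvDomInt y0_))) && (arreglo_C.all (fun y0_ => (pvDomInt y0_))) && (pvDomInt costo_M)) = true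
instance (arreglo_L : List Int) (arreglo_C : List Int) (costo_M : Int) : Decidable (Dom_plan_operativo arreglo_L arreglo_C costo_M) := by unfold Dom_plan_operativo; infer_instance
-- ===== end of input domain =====

-- B replaces A's DP arrays + backward reconstruction with a single forward pass that
-- carries the two candidate itineraries as shared cons-chains with their costs (objective: alternative).

-- ===== PORT A =====
-- body of A's reconstruction loop, named so the proofs can refer to it
def pasoRec (optCalifornia optLondres arreglo_L arreglo_C : List Int)
    (st : String × List String) (i : Int) : String × List String :=
  let ciudad :=
    if st.1 = "londres" then
      if PySem.List.pyGetD optLondres i 0 - PySem.List.pyGetD arreglo_L i 0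
          = PySem.List.pyGetD optLondres (i - 1) 0
      then "londres" else "california"
    else
      if PySem.List.pyGetD optCalifornia i 0 - PySem.List.pyGetD arreglo_C i 0
          = PySem.List.pyGetD optCalifornia (i - 1) 0
      then "california" else "londres"
  (ciudad, st.2 ++ [ciudad])

def reconstruccion (optCalifornia optLondres arreglo_L arreglo_C : List Int) : List String :=
  let n := optLondres.length
  let ciudad0 : String :=
    if PySem.List.pyGetD optLondres (-1) 0 < PySem.List.pyGetD optCalifornia (-1) 0
    then "londres" else "california"
  let st := (PySem.List.pyRange ((n : Int) - 1) 0 (-1)).foldl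
      (pasoRec optCalifornia optLondres arreglo_L arreglo_C) (ciudad0, [ciudad0])
  st.2.reverse  -- resultado[::-1]

-- body of A's forward loop
def pasoFwdA (arreglo_L arreglo_C : List Int) (costo_M : Int)
    (st : List Int × List Int) (i : Int) : List Int × List Int :=
  let oL := st.1.set i.toNat
      (PySem.List.pyGetD arreglo_L i 0 +
        min (PySem.List.pyGetD st.1 (i - 1) 0) (costo_M + PySem.List.pyGetD st.2 (i - 1) 0))
  let oC := st.2.set i.toNat
      (PySem.List.pyGetD arreglo_C i 0 +
        min (PySem.List.pyGetD st.2 (i - 1) 0) (costo_M + PySem.List.pyGetD oL (i - 1) 0))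
  (oL, oC)

def plan_operativo (arreglo_L : List Int) (arreglo_C : List Int) (costo_M : Int) : List String :=
  let n := arreglo_L.length
  let optL0 := (List.replicate n (0 : Int)).set 0 (PySem.List.pyGetD arreglo_L 0 0)
  let optC0 := (List.replicate n (0 : Int)).set 0 (PySem.List.pyGetD arreglo_C 0 0)
  let p := (PySem.List.pyRange 1 (n : Int) 1).foldl (pasoFwdA arreglo_L arreglo_C costo_M) (optL0, optC0)
  reconstruccion p.2 p.1 arreglo_L arreglo_C

-- ===== PORT B =====
-- body of B's forward loop: state = (costL, cadenaL, costC, cadenaC); the cons-chains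
-- ("londres", prev)/None are represented as Lean lists built by cons, newest city first
def pasoPlan (costo_M : Int) (st : Int × List String × Int × List String)
    (x : Int × Int) : Int × List String × Int × List String :=
  let costL := st.1
  let cadenaL := st.2.1
  let costC := st.2.2.1
  let cadenaC := st.2.2.2
  (x.1 + min costL (costo_M + costC),
   "londres" :: (if costL ≤ costo_M + costC then cadenaL else cadenaC),
   x.2 + min costC (costo_M + costL),
   "california" :: (if costC ≤ costo_M + costL then cadenaC else cadenaL))

def plan_operativo_alt (arreglo_L : List Int) (arreglo_C : List Int) (costo_M : Int) : List String :=
  let s := ((PySem.List.slice arreglo_L (some 1) none).zip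
            (PySem.List.slice arreglo_C (some 1) none)).foldl (pasoPlan costo_M)
      (PySem.List.pyGetD arreglo_L 0 0, ["londres"],
       PySem.List.pyGetD arreglo_C 0 0, ["california"])
  let cadena := if s.1 < s.2.2.1 then s.2.1 else s.2.2.2
  -- the while loop copies the chain front-to-back into plan; then plan.reverse()
  cadena.reverse

-- ===== PRECONDITION & SPEC =====
-- Pre_ excludes exactly the inputs where A raises IndexError: empty arreglo_L, or arreglo_C shorter than arreglo_L.
def Pre_plan_operativo (arreglo_L : List Int) (arreglo_C : List Int) (costo_M : Int) : Prop :=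
  arreglo_L ≠ [] ∧ arreglo_L.length ≤ arreglo_C.length
instance (arreglo_L : List Int) (arreglo_C : List Int) (costo_M : Int) : Decidable (Pre_plan_operativo arreglo_L arreglo_C costo_M) := by unfold Pre_plan_operativo; infer_instance

def pvWitness_plan_operativo : List Int × List Int × Int := ([1, 5, 2], [4, 1, 1], 2)

def Spec_plan_operativo (arreglo_L : List Int) (arreglo_C : List Int) (costo_M : Int) (out : List String) : Prop := out = plan_operativo_alt arreglo_L arreglo_C costo_M
instance (arreglo_L : List Int) (arreglo_C : List Int) (costo_M : Int) (out : List String) : Decidable (Spec_plan_operativo arreglo_L arreglo_C costo_M out) := by unfold Spec_plan_operativo; infer_instance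

-- ===== CLAIM (what is proved, stated in full; the proofs are below) =====
def Claim_equal_plan_operativo : Prop := ∀ (arreglo_L : List Int) (arreglo_C : List Int) (costo_M : Int), Dom_plan_operativo arreglo_L arreglo_C costo_M → Pre_plan_operativo arreglo_L arreglo_C costo_M → Spec_plan_operativo arreglo_L arreglo_C costo_M (plan_operativo arreglo_L arreglo_C costo_M)

-- ===== LEMMAS AND PROOFS =====

-- the mathematical DP recurrence both programs compute (cost pair at index i)
def optPar (L C : List Int) (m : Int) : Nat → Int × Int
  | 0 => (L.getD 0 0, C.getD 0 0)
  | i + 1 =>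
    let p := optPar L C m i
    (L.getD (i + 1) 0 + min p.1 (m + p.2),
     C.getD (i + 1) 0 + min p.2 (m + p.1))

-- the stay/switch decision pair after index j
def dparP (L C : List Int) (m : Int) (j : Nat) : Bool × Bool :=
  (decide ((optPar L C m j).1 ≤ m + (optPar L C m j).2),
   decide ((optPar L C m j).2 ≤ m + (optPar L C m j).1))

def cityStr (b : Bool) : String := if b then "londres" else "california"

def predD (L C : List Int) (m : Int) (k : Nat) (b : Bool) : Bool :=
  if b then (dparP L C m k).1 else !(dparP L C m k).2

-- the optimal itinerary of length k+1 ending in city b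
def walk (L C : List Int) (m : Int) : Nat → Bool → List String
  | 0, b => [cityStr b]
  | k + 1, b => walk L C m k (predD L C m k b) ++ [cityStr b]

-- abstract form of A's backward step (keyed by the decision pair)
def pasoBack (st : String × List String) (d : Bool × Bool) : String × List String :=
  let ciudad :=
    if st.1 = "londres" then (if d.1 then "londres" else "california")
    else (if d.2 then "california" else "londres")
  (ciudad, st.2 ++ [ciudad])

theorem getD_set_eq_ite (xs : List Int) (i j : Nat) (v d : Int) (hi : i < xs.length) :
    (xs.set i v).getD j d = if j = i then v else xs.getD j d := by
  by_cases h : j = i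
  · subst h; simp [List.getD, hi]
  · have h2 : i ≠ j := fun hh => h hh.symm
    simp only [List.getD, List.getElem?_set, if_neg h2, if_neg h]

theorem fwdA_inv (L C : List Int) (m : Int) (k : Nat)
    (hk : k ≤ L.length) (hn : 1 ≤ L.length) :
    ((PySem.List.pyRange 1 (k : Int) 1).foldl (pasoFwdA L C m)
        ((List.replicate L.length (0 : Int)).set 0 (PySem.List.pyGetD L 0 0),
         (List.replicate L.length (0 : Int)).set 0 (PySem.List.pyGetD C 0 0))).1.length = L.length ∧
    ((PySem.List.pyRange 1 (k : Int) 1).foldl (pasoFwdA L C m)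
        ((List.replicate L.length (0 : Int)).set 0 (PySem.List.pyGetD L 0 0),
         (List.replicate L.length (0 : Int)).set 0 (PySem.List.pyGetD C 0 0))).2.length = L.length ∧
    ∀ j : Nat, j < k →
      ((PySem.List.pyRange 1 (k : Int) 1).foldl (pasoFwdA L C m)
        ((List.replicate L.length (0 : Int)).set 0 (PySem.List.pyGetD L 0 0),
         (List.replicate L.length (0 : Int)).set 0 (PySem.List.pyGetD C 0 0))).1.getD j 0 = (optPar L C m j).1 ∧
      ((PySem.List.pyRange 1 (k : Int) 1).foldl (pasoFwdA L C m)
        ((List.replicate L.length (0 : Int)).set 0 (PySem.List.pyGetD L 0 0),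
         (List.replicate L.length (0 : Int)).set 0 (PySem.List.pyGetD C 0 0))).2.getD j 0 = (optPar L C m j).2 := by
  induction k with
  | zero =>
    rw [PySem.List.pyRange_one_eq_nil (by norm_num)]
    refine ⟨by simp, by simp, ?_⟩
    intro j hj; omega
  | succ k ih =>
    rcases Nat.eq_zero_or_pos k with hk0 | hkpos
    · subst hk0
      rw [show (((0:Nat)+1 : Nat) : Int) = 1 by norm_num,
          PySem.List.pyRange_one_eq_nil (by norm_num)]
      refine ⟨by simp, by simp, ?_⟩
      intro j hj
      have hj0 : j = 0 := by omega
      subst hj0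
      have hL0 : (0:Nat) < (List.replicate L.length (0 : Int)).length := by simpa using hn
      constructor
      · rw [List.foldl_nil, getD_set_eq_ite _ _ _ _ _ hL0]
        simp [PySem.List.pyGetD_zero, optPar]
      · rw [List.foldl_nil, getD_set_eq_ite _ _ _ _ _ hL0]
        simp [PySem.List.pyGetD_zero, optPar]
    · have hk1 : (1:Int) ≤ (k:Int) := by exact_mod_cast hkpos
      have hsplit : PySem.List.pyRange 1 ((k+1 : Nat) : Int) 1
          = PySem.List.pyRange 1 (k : Int) 1 ++ [(k:Int)] := by
        push_cast
        exact PySem.List.pyRange_one_succ_right hk1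
      obtain ⟨hL, hC, hv⟩ := ih (by omega)
      rw [hsplit, List.foldl_append, List.foldl_cons, List.foldl_nil]
      obtain ⟨hw1, hw2⟩ := hv (k-1) (by omega)
      have hcast : ((k:Int)) - 1 = ((k - 1 : Nat) : Int) := by omega
      have hkL : k < L.length := by omega
      simp only [pasoFwdA, Int.toNat_natCast, hcast, PySem.List.pyGetD_natCast]
      have hsetL : k < (((PySem.List.pyRange 1 (k : Int) 1).foldl (pasoFwdA L C m)
          ((List.replicate L.length (0 : Int)).set 0 (PySem.List.pyGetD L 0 0),
           (List.replicate L.length (0 : Int)).set 0 (PySem.List.pyGetD C 0 0))).1).length := by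
        rw [hL]; omega
      have hsetC : k < (((PySem.List.pyRange 1 (k : Int) 1).foldl (pasoFwdA L C m)
          ((List.replicate L.length (0 : Int)).set 0 (PySem.List.pyGetD L 0 0),
           (List.replicate L.length (0 : Int)).set 0 (PySem.List.pyGetD C 0 0))).2).length := by
        rw [hC]; omega
      refine ⟨by simp [hL], by simp [hC], ?_⟩
      intro j hj
      rw [getD_set_eq_ite _ _ _ _ _ hsetL, getD_set_eq_ite _ _ _ _ _ hsetC,
          getD_set_eq_ite _ _ _ _ _ hsetL]
      have hne : ¬ (k - 1 = k) := by omega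
      rw [if_neg hne, hw1, hw2]
      by_cases hjk : j = k
      · subst hjk
        rw [if_pos rfl, if_pos rfl]
        have hk' : j = (j - 1) + 1 := by omega
        constructor
        · rw [hk']; simp [optPar]
        · rw [hk']; simp [optPar]
      · rw [if_neg hjk, if_neg hjk]
        exact hv j (by omega)

theorem getLast_eq_getD (xs : List Int) (h : xs ≠ []) :
    xs.getLast h = xs.getD (xs.length - 1) 0 := by
  have hlt : xs.length - 1 < xs.length := by
    have := List.length_pos_of_ne_nil h; omega
  rw [List.getLast_eq_getElem, List.getD_eq_getElem?_getD, List.getElem?_eq_getElem hlt]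
  rfl

theorem paso_eq (L C oL oC : List Int) (m : Int) (n j : Nat) (hj : j < n - 1) (hn : 1 ≤ n)
    (hv : ∀ j' : Nat, j' < n → oL.getD j' 0 = (optPar L C m j').1 ∧ oC.getD j' 0 = (optPar L C m j').2)
    (st : String × List String) :
    pasoRec oC oL L C st (1 + (j:Int)) = pasoBack st (dparP L C m j) := by
  have h1 : (1 + (j:Int)) = ((j+1 : Nat) : Int) := by push_cast; ring
  have h2 : ((j+1 : Nat) : Int) - 1 = ((j : Nat) : Int) := by push_cast; ring
  obtain ⟨hv1, hv2⟩ := hv (j+1) (by omega)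
  obtain ⟨hw1, hw2⟩ := hv j (by omega)
  simp only [pasoRec, pasoBack, h1, h2, PySem.List.pyGetD_natCast]
  rw [hv1, hv2, hw1, hw2]
  by_cases hst : st.1 = "londres"
  · rw [if_pos hst, if_pos hst]
    by_cases h : (optPar L C m j).1 ≤ m + (optPar L C m j).2
    · have hcond : (optPar L C m (j+1)).1 - L.getD (j+1) 0 = (optPar L C m j).1 := by
        simp only [optPar]; omega
      rw [if_pos hcond]
      simp [dparP, h]
    · have hcond : ¬ ((optPar L C m (j+1)).1 - L.getD (j+1) 0 = (optPar L C m j).1) := by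
        simp only [optPar]; omega
      rw [if_neg hcond]
      simp [dparP, h]
  · rw [if_neg hst, if_neg hst]
    by_cases h : (optPar L C m j).2 ≤ m + (optPar L C m j).1
    · have hcond : (optPar L C m (j+1)).2 - C.getD (j+1) 0 = (optPar L C m j).2 := by
        simp only [optPar]; omega
      rw [if_pos hcond]
      simp [dparP, h]
    · have hcond : ¬ ((optPar L C m (j+1)).2 - C.getD (j+1) 0 = (optPar L C m j).2) := by
        simp only [optPar]; omega
      rw [if_neg hcond]
      simp [dparP, h]

-- A's backward foldl equals the abstract decision-driven foldl
theorem back_eq (L C oL oC : List Int) (m : Int) (n : Nat) (hn : 1 ≤ n)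
    (hv : ∀ j' : Nat, j' < n → oL.getD j' 0 = (optPar L C m j').1 ∧ oC.getD j' 0 = (optPar L C m j').2)
    (s0 : String × List String) :
    (PySem.List.pyRange ((n : Int) - 1) 0 (-1)).foldl (pasoRec oC oL L C) s0 =
    (((List.range (n-1)).reverse.map (dparP L C m)).foldl pasoBack s0) := by
  have hA : PySem.List.pyRange ((n:Int)-1) 0 (-1)
      = (((List.range (n-1)).reverse).map (fun j : Nat => 1 + (j:Int))) := by
    rw [PySem.List.pyRange_neg_one_eq_reverse]
    rw [show (0:Int) + 1 = 1 by ring, show ((n:Int) - 1) + 1 = (n:Int) by ring]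
    rw [PySem.List.pyRange_one]
    rw [show ((n:Int) - 1).toNat = n - 1 by omega]
    rw [← List.map_reverse]
  rw [hA, List.foldl_map, List.foldl_map]
  apply PySem.List.foldl_congr_mem
  intro acc x hx
  have hx' : x < n - 1 := by
    have := List.mem_reverse.mp hx
    simpa using this
  exact paso_eq L C oL oC m n x hx' hn hv acc

theorem walk_rev (L C : List Int) (m : Int) (k : Nat) (b : Bool) :
    (walk L C m k b).reverse = cityStr b :: (walk L C m k b).reverse.tail := by
  cases k with
  | zero => simp [walk]
  | succ k => simp [walk]

theorem pasoBack_city (L C : List Int) (m : Int) (k : Nat) (b : Bool) (acc : List String) :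
    pasoBack (cityStr b, acc) (dparP L C m k)
      = (cityStr (predD L C m k b), acc ++ [cityStr (predD L C m k b)]) := by
  cases b <;> cases hd1 : (dparP L C m k).1 <;> cases hd2 : (dparP L C m k).2 <;>
    simp [pasoBack, cityStr, predD, hd1, hd2]

-- the decision-driven backward foldl reconstructs exactly walk (reversed)
theorem Gfold (L C : List Int) (m : Int) :
    ∀ (k : Nat) (b : Bool) (acc : List String),
    (((List.range k).reverse.map (dparP L C m)).foldl pasoBack (cityStr b, acc)).2
      = acc ++ (walk L C m k b).reverse.tail := by
  intro k
  induction k with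
  | zero => intro b acc; simp [walk]
  | succ k ih =>
    intro b acc
    rw [List.range_succ, List.reverse_append, List.reverse_singleton]
    simp only [List.singleton_append, List.map_cons, List.foldl_cons]
    rw [pasoBack_city, ih (predD L C m k b) (acc ++ [cityStr (predD L C m k b)])]
    have : (walk L C m (k+1) b).reverse.tail
        = (walk L C m k (predD L C m k b)).reverse := by
      simp [walk]
    rw [this, walk_rev L C m k (predD L C m k b)]
    simp

-- B's zip input as a map over range
theorem zip_eq_map (L C : List Int) (hn : 1 ≤ L.length) (hlen : L.length ≤ C.length) :
    (L.tail).zip (C.tail)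
      = (List.range (L.length - 1)).map (fun j => (L.getD (j+1) 0, C.getD (j+1) 0)) := by
  apply List.ext_getElem
  · simp only [List.length_zip, List.length_tail, List.length_map, List.length_range]
    omega
  · intro i h1 h2
    have hiL : i < L.length - 1 := by
      simp only [List.length_zip, List.length_tail] at h1; omega
    have hiC : i + 1 < C.length := by omega
    have hiL' : i + 1 < L.length := by omega
    simp only [List.getElem_zip, List.getElem_tail, List.getElem_map, List.getElem_range]
    have gL : L.getD (i+1) 0 = L[i+1] := List.getD_eq_getElem L 0 hiL'
    have gC : C.getD (i+1) 0 = C[i+1] := List.getD_eq_getElem C 0 hiC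
    rw [gL, gC]

-- B's forward fold computes the costs and the reversed walks (the cons-chains)
theorem Bfold (L C : List Int) (m : Int) :
    ∀ k, k ≤ L.length - 1 →
    (((List.range k).map (fun j => (L.getD (j+1) 0, C.getD (j+1) 0))).foldl (pasoPlan m)
        (PySem.List.pyGetD L 0 0, ["londres"], PySem.List.pyGetD C 0 0, ["california"]))
      = ((optPar L C m k).1, (walk L C m k true).reverse,
         (optPar L C m k).2, (walk L C m k false).reverse) := by
  intro k
  induction k with
  | zero => intro _; simp [optPar, walk, cityStr, PySem.List.pyGetD_zero]
  | succ k ih =>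
    intro hk
    rw [List.range_succ, List.map_append, List.foldl_append, ih (by omega)]
    simp only [List.map_cons, List.map_nil, List.foldl_cons, List.foldl_nil, pasoPlan]
    have hwL : "londres" :: (if (optPar L C m k).1 ≤ m + (optPar L C m k).2
          then (walk L C m k true).reverse else (walk L C m k false).reverse)
        = (walk L C m (k+1) true).reverse := by
      simp only [walk, predD, dparP]
      by_cases h : (optPar L C m k).1 ≤ m + (optPar L C m k).2 <;> simp [h, cityStr]
    have hwC : "california" :: (if (optPar L C m k).2 ≤ m + (optPar L C m k).1
          then (walk L C m k false).reverse else (walk L C m k true).reverse)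
        = (walk L C m (k+1) false).reverse := by
      simp only [walk, predD, dparP]
      by_cases h : (optPar L C m k).2 ≤ m + (optPar L C m k).1 <;> simp [h, cityStr]
    simp only [hwL, hwC]
    simp [optPar]

-- ===== VERDICT (by name: the statement is the Claim_ definition above) =====
theorem plan_operativo_spec : Claim_equal_plan_operativo := by
  intro L C m _ hpre
  obtain ⟨hne, hlen⟩ := hpre
  have hn : 1 ≤ L.length := List.length_pos_of_ne_nil hne
  obtain ⟨hAL, hAC, hAv⟩ := fwdA_inv L C m L.length le_rfl hn
  unfold Spec_plan_operativo plan_operativo plan_operativo_alt reconstruccion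
  simp only []
  set pA := (PySem.List.pyRange 1 (L.length : Int) 1).foldl (pasoFwdA L C m)
      ((List.replicate L.length (0 : Int)).set 0 (PySem.List.pyGetD L 0 0),
       (List.replicate L.length (0 : Int)).set 0 (PySem.List.pyGetD C 0 0)) with hpA
  have hneL : pA.1 ≠ [] := by
    have : pA.1.length = L.length := hAL
    intro hnil; rw [hnil] at this; simp at this; omega
  have hneC : pA.2 ≠ [] := by
    have : pA.2.length = L.length := hAC
    intro hnil; rw [hnil] at this; simp at this; omega
  have hlast1 : PySem.List.pyGetD pA.1 (-1) 0 = (optPar L C m (L.length - 1)).1 := by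
    rw [PySem.List.pyGetD_neg_one pA.1 0 hneL, getLast_eq_getD, hAL]
    exact (hAv (L.length - 1) (by omega)).1
  have hlast2 : PySem.List.pyGetD pA.2 (-1) 0 = (optPar L C m (L.length - 1)).2 := by
    rw [PySem.List.pyGetD_neg_one pA.2 0 hneC, getLast_eq_getD, hAC]
    exact (hAv (L.length - 1) (by omega)).2
  rw [hlast1, hlast2, hAL]
  -- B side
  rw [PySem.List.slice_from_one, PySem.List.slice_from_one,
      zip_eq_map L C hn hlen, Bfold L C m (L.length - 1) le_rfl]
  -- A side: foldl over decisions, then walk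
  rw [back_eq L C pA.1 pA.2 m L.length hn hAv]
  by_cases hfin : (optPar L C m (L.length - 1)).1 < (optPar L C m (L.length - 1)).2
  · rw [if_pos hfin, if_pos hfin]
    have : ("londres" : String) = cityStr true := rfl
    rw [this, Gfold L C m (L.length - 1) true [cityStr true]]
    rw [show [cityStr true] ++ (walk L C m (L.length - 1) true).reverse.tail
        = (walk L C m (L.length - 1) true).reverse from by
      rw [walk_rev L C m (L.length - 1) true]; simp]
  · rw [if_neg hfin, if_neg hfin]
    have : ("california" : String) = cityStr false := rfl
    rw [this, Gfold L C m (L.length - 1) false [cityStr false]]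
    rw [show [cityStr false] ++ (walk L C m (L.length - 1) false).reverse.tail
        = (walk L C m (L.length - 1) false).reverse from by
      rw [walk_rev L C m (L.length - 1) false]; simp]
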